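-- pv_equiv track=rewrite | github.com/BHUPESHio/Project1 | app.py | categorize_bodyfat
-- ===== SOURCE A (Python) =====
-- def categorize_bodyfat(gender, value):
--     zones = {
--         "male": [(5, "Essential"), (13, "Athletes"), (17, "Fitness"), (24, "Average"), (40, "Obese")],
--         "female": [(13, "Essential"), (20, "Athletes"), (24, "Fitness"), (31, "Average"), (45, "Obese")]
--     }
--     for limit, label in zones[gender]:
--         if value <= limit:
--             return label
--     return "Extremely High"
-- ===== SOURCE B (Python) =====
-- def categorize_bodyfat(gender, value):
--     zones = {
--         "male": ([5, 13, 17, 24, 40],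
--                  ["Essential", "Athletes", "Fitness", "Average", "Obese", "Extremely High"]),
--         "female": ([13, 20, 24, 31, 45],
--                    ["Essential", "Athletes", "Fitness", "Average", "Obese", "Extremely High"]),
--     }
--     limits, labels = zones[gender]
--     lo, hi = 0, len(limits)
--     while lo < hi:
--         mid = (lo + hi) // 2
--         if limits[mid] < value:
--             lo = mid + 1
--         else:
--             hi = mid
--     return labels[lo]
-- ===== Notes on version B (the rewrite author's own statement) =====
-- stated objective: alternative
-- what changed: Replaces the linear scan over (limit,label) pairs and the early-return fallthrough by parallel sorted limits/labels lists and an in-place binary search (bisect_left) that indexes the label directly.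
import Mathlib
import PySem

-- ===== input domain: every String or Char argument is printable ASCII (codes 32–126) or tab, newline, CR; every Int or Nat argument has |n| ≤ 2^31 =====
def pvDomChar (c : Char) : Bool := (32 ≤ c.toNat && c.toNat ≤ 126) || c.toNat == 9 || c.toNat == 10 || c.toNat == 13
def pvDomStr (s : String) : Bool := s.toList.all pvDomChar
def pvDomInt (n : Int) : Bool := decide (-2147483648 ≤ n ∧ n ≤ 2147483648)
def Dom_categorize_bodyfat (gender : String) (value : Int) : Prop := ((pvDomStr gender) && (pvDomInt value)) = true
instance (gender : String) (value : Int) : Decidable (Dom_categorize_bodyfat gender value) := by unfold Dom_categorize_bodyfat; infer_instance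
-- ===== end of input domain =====

-- B replaces A's linear scan over (limit,label) pairs by a binary search over
-- parallel sorted limits/labels lists (alternative structure, same exact output).


-- ===== PORT A =====
-- the for-loop with early return over zones[gender]
def bodyfatLoopA : List (Int × String) → Int → String
  | [], _ => "Extremely High"
  | (limit, label) :: rest, value =>
      if value ≤ limit then label else bodyfatLoopA rest value

def categorize_bodyfat (gender : String) (value : Int) : String :=
  let zones : PySem.Dict String (List (Int × String)) :=
    PySem.Dict.mk [("male", [(5, "Essential"), (13, "Athletes"), (17, "Fitness"), (24, "Average"), (40, "Obese")]),
                   ("female", [(13, "Essential"), (20, "Athletes"), (24, "Fitness"), (31, "Average"), (45, "Obese")])]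
  match zones.get? gender with
  | some lst => bodyfatLoopA lst value
  | none => ""   -- Python raises KeyError here; excluded by Pre_

-- ===== PORT B =====
-- hand-rolled bisect_left (the while-loop of Source B)
def bisectLeft (limits : List Int) (value : Int) (lo hi : Nat) : Nat :=
  if _h : lo < hi then
    let mid := (lo + hi) / 2
    if limits.getD mid 0 < value then bisectLeft limits value (mid + 1) hi
    else bisectLeft limits value lo mid
  else lo
termination_by hi - lo
decreasing_by all_goals omega

def categorize_bodyfat_alt (gender : String) (value : Int) : String :=
  let zones : PySem.Dict String (List Int × List String) :=
    PySem.Dict.mk [("male", ([5, 13, 17, 24, 40],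
                             ["Essential", "Athletes", "Fitness", "Average", "Obese", "Extremely High"])),
                   ("female", ([13, 20, 24, 31, 45],
                               ["Essential", "Athletes", "Fitness", "Average", "Obese", "Extremely High"]))]
  match zones.get? gender with
  | some (limits, labels) => labels.getD (bisectLeft limits value 0 limits.length) ""
  | none => ""   -- Python raises KeyError here; excluded by Pre_

-- ===== PRECONDITION & SPEC =====
-- Pre_ excludes exactly the genders absent from the dict, where A raises KeyError.
def Pre_categorize_bodyfat (gender : String) (value : Int) : Prop :=
  gender = "male" ∨ gender = "female"
instance (gender : String) (value : Int) : Decidable (Pre_categorize_bodyfat gender value) := by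
  unfold Pre_categorize_bodyfat; infer_instance

def pvWitness_categorize_bodyfat : String × Int := ("male", 15)

def Spec_categorize_bodyfat (gender : String) (value : Int) (out : String) : Prop := out = categorize_bodyfat_alt gender value
instance (gender : String) (value : Int) (out : String) : Decidable (Spec_categorize_bodyfat gender value out) := by unfold Spec_categorize_bodyfat; infer_instance

-- ===== CLAIM (what is proved, stated in full; the proofs are below) =====
def Claim_equal_categorize_bodyfat : Prop := ∀ (gender : String) (value : Int), Dom_categorize_bodyfat gender value → Pre_categorize_bodyfat gender value → Spec_categorize_bodyfat gender value (categorize_bodyfat gender value)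

-- ===== LEMMAS AND PROOFS =====
lemma male_eq (v : Int) : categorize_bodyfat "male" v = categorize_bodyfat_alt "male" v := by
  obtain h|h|h|h|h|h : v ≤ 5 ∨ (5 < v ∧ v ≤ 13) ∨ (13 < v ∧ v ≤ 17) ∨ (17 < v ∧ v ≤ 24) ∨ (24 < v ∧ v ≤ 40) ∨ 40 < v := by omega
  · simp [categorize_bodyfat, categorize_bodyfat_alt, bodyfatLoopA, bisectLeft, PySem.Dict.get?,
      show v ≤ (5:Int) from by omega,
      show ¬ (5:Int) < v from by omega,
      show v ≤ (13:Int) from by omega,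
      show ¬ (13:Int) < v from by omega,
      show v ≤ (17:Int) from by omega,
      show ¬ (17:Int) < v from by omega,
      show v ≤ (24:Int) from by omega,
      show ¬ (24:Int) < v from by omega,
      show v ≤ (40:Int) from by omega,
      show ¬ (40:Int) < v from by omega]
  · simp [categorize_bodyfat, categorize_bodyfat_alt, bodyfatLoopA, bisectLeft, PySem.Dict.get?,
      show ¬ v ≤ (5:Int) from by omega,
      show (5:Int) < v from by omega,
      show v ≤ (13:Int) from by omega,
      show ¬ (13:Int) < v from by omega,
      show v ≤ (17:Int) from by omega,
      show ¬ (17:Int) < v from by omega,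
      show v ≤ (24:Int) from by omega,
      show ¬ (24:Int) < v from by omega,
      show v ≤ (40:Int) from by omega,
      show ¬ (40:Int) < v from by omega]
  · simp [categorize_bodyfat, categorize_bodyfat_alt, bodyfatLoopA, bisectLeft, PySem.Dict.get?,
      show ¬ v ≤ (5:Int) from by omega,
      show (5:Int) < v from by omega,
      show ¬ v ≤ (13:Int) from by omega,
      show (13:Int) < v from by omega,
      show v ≤ (17:Int) from by omega,
      show ¬ (17:Int) < v from by omega,
      show v ≤ (24:Int) from by omega,
      show ¬ (24:Int) < v from by omega,
      show v ≤ (40:Int) from by omega,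
      show ¬ (40:Int) < v from by omega]
  · simp [categorize_bodyfat, categorize_bodyfat_alt, bodyfatLoopA, bisectLeft, PySem.Dict.get?,
      show ¬ v ≤ (5:Int) from by omega,
      show (5:Int) < v from by omega,
      show ¬ v ≤ (13:Int) from by omega,
      show (13:Int) < v from by omega,
      show ¬ v ≤ (17:Int) from by omega,
      show (17:Int) < v from by omega,
      show v ≤ (24:Int) from by omega,
      show ¬ (24:Int) < v from by omega,
      show v ≤ (40:Int) from by omega,
      show ¬ (40:Int) < v from by omega]
  · simp [categorize_bodyfat, categorize_bodyfat_alt, bodyfatLoopA, bisectLeft, PySem.Dict.get?,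
      show ¬ v ≤ (5:Int) from by omega,
      show (5:Int) < v from by omega,
      show ¬ v ≤ (13:Int) from by omega,
      show (13:Int) < v from by omega,
      show ¬ v ≤ (17:Int) from by omega,
      show (17:Int) < v from by omega,
      show ¬ v ≤ (24:Int) from by omega,
      show (24:Int) < v from by omega,
      show v ≤ (40:Int) from by omega,
      show ¬ (40:Int) < v from by omega]
  · simp [categorize_bodyfat, categorize_bodyfat_alt, bodyfatLoopA, bisectLeft, PySem.Dict.get?,
      show ¬ v ≤ (5:Int) from by omega,
      show (5:Int) < v from by omega,
      show ¬ v ≤ (13:Int) from by omega,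
      show (13:Int) < v from by omega,
      show ¬ v ≤ (17:Int) from by omega,
      show (17:Int) < v from by omega,
      show ¬ v ≤ (24:Int) from by omega,
      show (24:Int) < v from by omega,
      show ¬ v ≤ (40:Int) from by omega,
      show (40:Int) < v from by omega]

lemma female_eq (v : Int) : categorize_bodyfat "female" v = categorize_bodyfat_alt "female" v := by
  obtain h|h|h|h|h|h : v ≤ 13 ∨ (13 < v ∧ v ≤ 20) ∨ (20 < v ∧ v ≤ 24) ∨ (24 < v ∧ v ≤ 31) ∨ (31 < v ∧ v ≤ 45) ∨ 45 < v := by omega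
  · simp [categorize_bodyfat, categorize_bodyfat_alt, bodyfatLoopA, bisectLeft, PySem.Dict.get?,
      show v ≤ (13:Int) from by omega,
      show ¬ (13:Int) < v from by omega,
      show v ≤ (20:Int) from by omega,
      show ¬ (20:Int) < v from by omega,
      show v ≤ (24:Int) from by omega,
      show ¬ (24:Int) < v from by omega,
      show v ≤ (31:Int) from by omega,
      show ¬ (31:Int) < v from by omega,
      show v ≤ (45:Int) from by omega,
      show ¬ (45:Int) < v from by omega]
  · simp [categorize_bodyfat, categorize_bodyfat_alt, bodyfatLoopA, bisectLeft, PySem.Dict.get?,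
      show ¬ v ≤ (13:Int) from by omega,
      show (13:Int) < v from by omega,
      show v ≤ (20:Int) from by omega,
      show ¬ (20:Int) < v from by omega,
      show v ≤ (24:Int) from by omega,
      show ¬ (24:Int) < v from by omega,
      show v ≤ (31:Int) from by omega,
      show ¬ (31:Int) < v from by omega,
      show v ≤ (45:Int) from by omega,
      show ¬ (45:Int) < v from by omega]
  · simp [categorize_bodyfat, categorize_bodyfat_alt, bodyfatLoopA, bisectLeft, PySem.Dict.get?,
      show ¬ v ≤ (13:Int) from by omega,
      show (13:Int) < v from by omega,
      show ¬ v ≤ (20:Int) from by omega,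
      show (20:Int) < v from by omega,
      show v ≤ (24:Int) from by omega,
      show ¬ (24:Int) < v from by omega,
      show v ≤ (31:Int) from by omega,
      show ¬ (31:Int) < v from by omega,
      show v ≤ (45:Int) from by omega,
      show ¬ (45:Int) < v from by omega]
  · simp [categorize_bodyfat, categorize_bodyfat_alt, bodyfatLoopA, bisectLeft, PySem.Dict.get?,
      show ¬ v ≤ (13:Int) from by omega,
      show (13:Int) < v from by omega,
      show ¬ v ≤ (20:Int) from by omega,
      show (20:Int) < v from by omega,
      show ¬ v ≤ (24:Int) from by omega,
      show (24:Int) < v from by omega,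
      show v ≤ (31:Int) from by omega,
      show ¬ (31:Int) < v from by omega,
      show v ≤ (45:Int) from by omega,
      show ¬ (45:Int) < v from by omega]
  · simp [categorize_bodyfat, categorize_bodyfat_alt, bodyfatLoopA, bisectLeft, PySem.Dict.get?,
      show ¬ v ≤ (13:Int) from by omega,
      show (13:Int) < v from by omega,
      show ¬ v ≤ (20:Int) from by omega,
      show (20:Int) < v from by omega,
      show ¬ v ≤ (24:Int) from by omega,
      show (24:Int) < v from by omega,
      show ¬ v ≤ (31:Int) from by omega,
      show (31:Int) < v from by omega,
      show v ≤ (45:Int) from by omega,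
      show ¬ (45:Int) < v from by omega]
  · simp [categorize_bodyfat, categorize_bodyfat_alt, bodyfatLoopA, bisectLeft, PySem.Dict.get?,
      show ¬ v ≤ (13:Int) from by omega,
      show (13:Int) < v from by omega,
      show ¬ v ≤ (20:Int) from by omega,
      show (20:Int) < v from by omega,
      show ¬ v ≤ (24:Int) from by omega,
      show (24:Int) < v from by omega,
      show ¬ v ≤ (31:Int) from by omega,
      show (31:Int) < v from by omega,
      show ¬ v ≤ (45:Int) from by omega,
      show (45:Int) < v from by omega]


-- ===== VERDICT (by name: the statement is the Claim_ definition above) =====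
theorem categorize_bodyfat_spec : Claim_equal_categorize_bodyfat := by
  intro gender value _ hp
  unfold Spec_categorize_bodyfat
  rcases hp with h | h <;> subst h
  · exact male_eq value
  · exact female_eq value
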